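-- pv_equiv track=rewrite | github.com/jonpiffle/amr_discourse | scorer.py | get_root_swaps
-- ===== SOURCE A (Python) =====
-- def get_root_swaps(root_partitions, goal_root_partitions):
--     def get_goal_partition_index(root):
--         return next(i for i, root_partition in enumerate(goal_root_partitions) if root in root_partition)
--
--     count = 0
--     for i, root_partition_i in enumerate(root_partitions):
--         for root_partition_j in root_partitions[i + 1:]:
--             for root_i in root_partition_i:
--                 for root_j in root_partition_j:
--                     if get_goal_partition_index(root_i) > get_goal_partition_index(root_j):
--                         count += 1
--     return count
-- ===== SOURCE B (Python) =====
-- def get_root_swaps(root_partitions, goal_root_partitions):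
--     # Precompute each root's goal-partition index once (first containing partition),
--     # then count cross-partition inversions in one streaming pass with a counter
--     # of goal indices seen in earlier partitions.
--     idx = {}
--     for i, gp in enumerate(goal_root_partitions):
--         for r in gp:
--             if r not in idx:
--                 idx[r] = i
--     count = 0
--     seen = {}  # goal-partition index -> multiplicity among roots of earlier partitions
--     for part in root_partitions:
--         gs = [idx[r] for r in part]
--         for g in gs:
--             count += sum(c for k, c in seen.items() if k > g)
--         for g in gs:
--             seen[g] = seen.get(g, 0) + 1
--     return count
-- ===== Notes on version B (the rewrite author's own statement) =====
-- stated objective: faster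
-- what changed: Instead of re-scanning all goal partitions for every element of every cross-partition pair (quadruple nested loop), B precomputes a root-to-goal-index dict once and counts inversions in a single streaming pass over the partitions, keeping a counter of goal indices seen in earlier partitions.
-- outside the precondition, e.g. on get_root_swaps([[5]], [[1]]): A returns 0, B raises KeyError
import Mathlib
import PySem

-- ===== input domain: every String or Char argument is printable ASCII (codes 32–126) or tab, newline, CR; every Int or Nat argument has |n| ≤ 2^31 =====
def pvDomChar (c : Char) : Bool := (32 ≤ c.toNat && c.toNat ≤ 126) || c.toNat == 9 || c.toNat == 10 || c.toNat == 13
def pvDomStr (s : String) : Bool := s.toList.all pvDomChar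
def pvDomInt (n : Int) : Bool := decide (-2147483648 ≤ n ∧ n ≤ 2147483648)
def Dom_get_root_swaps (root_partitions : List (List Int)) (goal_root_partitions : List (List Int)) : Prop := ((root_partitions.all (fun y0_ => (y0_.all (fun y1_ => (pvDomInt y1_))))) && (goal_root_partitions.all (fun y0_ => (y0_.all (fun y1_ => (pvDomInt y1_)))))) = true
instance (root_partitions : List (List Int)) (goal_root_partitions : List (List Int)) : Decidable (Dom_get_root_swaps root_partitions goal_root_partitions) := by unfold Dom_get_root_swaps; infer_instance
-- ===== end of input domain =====

-- B precomputes a root→goal-index dict once and counts cross-partition inversions in one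
-- streaming pass with a counter of earlier goal indices, replacing A's quadruple nested loop
-- that re-scans the goal partitions for every comparison (objective: faster).

-- ===== PORT A =====
-- next(i for i, p in enumerate(goal_root_partitions) if root in p); none = StopIteration
def pvGpiA (gps : List (List Int)) (root : Int) (i : Int) : Option Int :=
  match gps with
  | [] => none
  | p :: rest => if root ∈ p then some i else pvGpiA rest root (i + 1)

-- the nested 'for' loops; 'root_partitions[i+1:]' is exactly the tail of the enumeration,
-- so the outer enumerate is ported as structural recursion carrying the tail.
-- '.getD 0' stands for a successful lookup (Pre_ excludes StopIteration).
def pvLoopA (gps : List (List Int)) : List (List Int) → Int → Int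
  | [], count => count
  | pi :: rest, count =>
      pvLoopA gps rest
        (rest.foldl (fun count pj =>
          pi.foldl (fun count ri =>
            pj.foldl (fun count rj =>
              if (pvGpiA gps ri 0).getD 0 > (pvGpiA gps rj 0).getD 0 then count + 1 else count)
              count) count) count)

def get_root_swaps (root_partitions : List (List Int)) (goal_root_partitions : List (List Int)) : Int :=
  pvLoopA goal_root_partitions root_partitions 0

-- ===== PORT B =====
-- idx = {}; for i, gp in enumerate(goal_root_partitions): for r in gp: if r not in idx: idx[r] = i
def pvIdxB (gps : List (List Int)) : PySem.Dict Int Int :=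
  (PySem.List.enumerate gps 0).foldl
    (fun d p => p.2.foldl (fun d' r => if d'.contains r then d' else d'.insert r p.1) d)
    PySem.Dict.empty

-- the streaming pass; '.getD r 0' stands for idx[r] (Pre_ excludes KeyError)
def get_root_swaps_alt (root_partitions : List (List Int)) (goal_root_partitions : List (List Int)) : Int :=
  let idx := pvIdxB goal_root_partitions
  (root_partitions.foldl
    (fun (st : Int × PySem.Dict Int Int) part =>
      let gs := part.map (fun r => idx.getD r 0)
      let count := gs.foldl
        (fun c g => c + st.2.items.foldl (fun s p => if p.1 > g then s + p.2 else s) 0) st.1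
      let seen := gs.foldl (fun d g => d.insert g (d.getD g 0 + 1)) st.2
      (count, seen))
    (0, PySem.Dict.empty)).1

-- ===== PRECONDITION & SPEC =====
-- Pre_ excludes inputs containing a root that lies in no goal partition: on those A's lazy
-- lookup raises StopIteration on any cross-partition pair and only returns 0 in the degenerate
-- case where no cross pair reaches the missing root, while B raises KeyError on all of them.
def Pre_get_root_swaps (root_partitions : List (List Int)) (goal_root_partitions : List (List Int)) : Prop :=
  ∀ p ∈ root_partitions, ∀ r ∈ p, ∃ gp ∈ goal_root_partitions, r ∈ gp
instance (root_partitions : List (List Int)) (goal_root_partitions : List (List Int)) : Decidable (Pre_get_root_swaps root_partitions goal_root_partitions) := by unfold Pre_get_root_swaps; infer_instance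

def pvWitness_get_root_swaps : List (List Int) × List (List Int) := ([[1], [2]], [[2], [1]])

def Spec_get_root_swaps (root_partitions : List (List Int)) (goal_root_partitions : List (List Int)) (out : Int) : Prop := out = get_root_swaps_alt root_partitions goal_root_partitions
instance (root_partitions : List (List Int)) (goal_root_partitions : List (List Int)) (out : Int) : Decidable (Spec_get_root_swaps root_partitions goal_root_partitions out) := by unfold Spec_get_root_swaps; infer_instance

-- ===== CLAIM (what is proved, stated in full; the proofs are below) =====
def Claim_equal_get_root_swaps : Prop := ∀ (root_partitions : List (List Int)) (goal_root_partitions : List (List Int)), Dom_get_root_swaps root_partitions goal_root_partitions → Pre_get_root_swaps root_partitions goal_root_partitions → Spec_get_root_swaps root_partitions goal_root_partitions (get_root_swaps root_partitions goal_root_partitions)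

-- ===== LEMMAS AND PROOFS =====

-- the goal index of a root, as A computes it (0 stands for a raise; Pre_ keeps inputs away)
def pvG (gps : List (List Int)) (r : Int) : Int := (pvGpiA gps r 0).getD 0

-- number of pairs (a ∈ xs, b ∈ ys) with a > b, summed per earlier element / per later element
def pvCrossA (xs ys : List Int) : Int := (xs.map (fun a => (ys.countP (fun b => decide (b < a)) : Int))).sum
def pvCrossB (xs ys : List Int) : Int := (ys.map (fun b => (xs.countP (fun a => decide (b < a)) : Int))).sum

-- cross-partition inversions, A's shape (head against each later block) …
def pvInvs : List (List Int) → Int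
  | [] => 0
  | x :: rest => (rest.map (fun y => pvCrossA x y)).sum + pvInvs rest

-- … and B's shape (accumulated earlier elements S against the current block)
def pvInvs2 : List Int → List (List Int) → Int
  | _, [] => 0
  | S, gs :: rest => pvCrossB S gs + pvInvs2 (S ++ gs) rest

lemma pvCrossA_eq_pvCrossB (xs ys : List Int) : pvCrossA xs ys = pvCrossB xs ys := by
  induction xs with
  | nil => simp [pvCrossA, pvCrossB]
  | cons a xs ih =>
    simp only [pvCrossA, pvCrossB, List.map_cons, List.sum_cons, List.countP_cons] at *
    push_cast
    rw [PySem.List.sum_map_add_int, ih, PySem.List.sum_map_ite_one_zero]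
    ring

lemma pvCrossB_nil (ys : List Int) : pvCrossB [] ys = 0 := by
  simp [pvCrossB]

lemma pvCrossB_append (S T ys : List Int) :
    pvCrossB (S ++ T) ys = pvCrossB S ys + pvCrossB T ys := by
  simp only [pvCrossB, List.countP_append]
  push_cast
  rw [PySem.List.sum_map_add_int]

lemma pvInvs2_eq (S : List Int) (M : List (List Int)) :
    pvInvs2 S M = (M.map (fun y => pvCrossB S y)).sum + pvInvs M := by
  induction M generalizing S with
  | nil => simp [pvInvs2, pvInvs]
  | cons gs rest ih =>
    simp only [pvInvs2, pvInvs, List.map_cons, List.sum_cons, ih (S ++ gs)]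
    have h1 : (rest.map (fun y => pvCrossB (S ++ gs) y)).sum
        = (rest.map (fun y => pvCrossB S y)).sum + (rest.map (fun y => pvCrossB gs y)).sum := by
      rw [← PySem.List.sum_map_add_int]
      exact congrArg List.sum (List.map_congr_left fun y _ => pvCrossB_append S gs y)
    have h2 : (rest.map (fun y => pvCrossA gs y)) = (rest.map (fun y => pvCrossB gs y)) :=
      List.map_congr_left fun y _ => pvCrossA_eq_pvCrossB gs y
    rw [h1, h2]; ring

-- ---- side A: the quadruple loop counts pvInvs of the mapped sequence ----

lemma pvInnerA (gps : List (List Int)) (v : Int) (pj : List Int) (c : Int) :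
    pj.foldl (fun c rj => if v > (pvGpiA gps rj 0).getD 0 then c + 1 else c) c
      = c + ((pj.map (pvG gps)).countP (fun b => decide (b < v)) : Int) := by
  have h := PySem.List.foldl_count_if (fun rj => decide ((pvGpiA gps rj 0).getD 0 < v)) pj c
  simp only [decide_eq_true_eq] at h
  rw [List.countP_map]
  simpa [gt_iff_lt, Function.comp, pvG] using h

lemma pvMidA (gps : List (List Int)) (pi pj : List Int) (c : Int) :
    pi.foldl (fun c ri =>
        pj.foldl (fun c rj => if (pvGpiA gps ri 0).getD 0 > (pvGpiA gps rj 0).getD 0 then c + 1 else c) c) c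
      = c + pvCrossA (pi.map (pvG gps)) (pj.map (pvG gps)) := by
  have hf : (fun (c : Int) (ri : Int) =>
      pj.foldl (fun c rj => if (pvGpiA gps ri 0).getD 0 > (pvGpiA gps rj 0).getD 0 then c + 1 else c) c)
      = fun c ri => c + ((pj.map (pvG gps)).countP (fun b => decide (b < pvG gps ri)) : Int) := by
    funext c ri; exact pvInnerA gps ((pvGpiA gps ri 0).getD 0) pj c
  rw [hf, PySem.List.foldl_add]
  simp only [pvCrossA, List.map_map]
  rfl

lemma pvOuterA (gps : List (List Int)) (pi : List Int) (rest : List (List Int)) (c : Int) :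
    rest.foldl (fun c pj =>
        pi.foldl (fun c ri =>
          pj.foldl (fun c rj => if (pvGpiA gps ri 0).getD 0 > (pvGpiA gps rj 0).getD 0 then c + 1 else c) c) c) c
      = c + (rest.map (fun pj => pvCrossA (pi.map (pvG gps)) (pj.map (pvG gps)))).sum := by
  have hf : (fun (c : Int) (pj : List Int) =>
      pi.foldl (fun c ri =>
        pj.foldl (fun c rj => if (pvGpiA gps ri 0).getD 0 > (pvGpiA gps rj 0).getD 0 then c + 1 else c) c) c)
      = fun c pj => c + pvCrossA (pi.map (pvG gps)) (pj.map (pvG gps)) := by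
    funext c pj; exact pvMidA gps pi pj c
  rw [hf, PySem.List.foldl_add]

lemma pvLoopA_eq (gps : List (List Int)) (rps : List (List Int)) (c : Int) :
    pvLoopA gps rps c = c + pvInvs (rps.map (fun p => p.map (pvG gps))) := by
  induction rps generalizing c with
  | nil => simp [pvLoopA, pvInvs]
  | cons pi rest ih =>
    show pvLoopA gps rest _ = _
    rw [ih]
    rw [pvOuterA gps pi rest c]
    simp only [pvInvs, List.map_cons, List.map_map, Function.comp_def]
    ring

-- ---- side B: the dict lookup equals A's goal index ----

lemma pvInnerIdx (gp : List Int) (i : Int) (d : PySem.Dict Int Int) (r : Int) :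
    (gp.foldl (fun d' r' => if d'.contains r' then d' else d'.insert r' i) d).get? r
      = if r ∈ gp ∧ d.contains r = false then some i else d.get? r := by
  induction gp generalizing d with
  | nil => simp
  | cons x gp ih =>
    simp only [List.foldl_cons]
    by_cases hc : d.contains x
    · rw [if_pos hc, ih]
      by_cases hxr : x = r
      · subst hxr; simp [hc]
      · have hrx : ¬ r = x := fun h => hxr h.symm
        simp [hrx]
    · rw [if_neg hc, ih]
      by_cases hxr : x = r
      · subst hxr
        have h1 : (d.insert x i).get? x = some i := PySem.Dict.get?_insert_self d x i
        have h2 : (d.insert x i).contains x = true := by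
          rw [PySem.Dict.contains_eq_isSome_get?, h1]; rfl
        simp [h2, h1, hc]
      · have h1 : (d.insert x i).get? r = d.get? r :=
          PySem.Dict.get?_insert_of_ne d i (fun h => hxr h.symm)
        have h2 : (d.insert x i).contains r = d.contains r := by
          rw [PySem.Dict.contains_eq_isSome_get?, PySem.Dict.contains_eq_isSome_get?, h1]
        have hrx : ¬ r = x := fun h => hxr h.symm
        simp [h1, h2, hrx]

lemma pvOuterIdx (gps : List (List Int)) (s : Int) (d : PySem.Dict Int Int) (r : Int) :
    (((PySem.List.enumerate gps s).foldl
        (fun d p => p.2.foldl (fun d' r' => if d'.contains r' then d' else d'.insert r' p.1) d)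
        d).get? r)
      = if d.contains r then d.get? r else pvGpiA gps r s := by
  induction gps generalizing s d with
  | nil =>
    simp only [PySem.List.enumerate_nil, List.foldl_nil, pvGpiA]
    by_cases hc : d.contains r
    · rw [if_pos hc]
    · rw [if_neg hc]
      rw [PySem.Dict.contains_eq_isSome_get?] at hc
      exact Option.not_isSome_iff_eq_none.mp (by simpa using hc)
  | cons gp gps ih =>
    rw [PySem.List.enumerate_cons, List.foldl_cons, ih]
    dsimp only
    by_cases hc : d.contains r
    · have h1 := pvInnerIdx gp s d r
      rw [hc] at h1; simp only [Bool.true_eq_false, and_false, if_false] at h1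
      have h2 : (gp.foldl (fun d' r' => if d'.contains r' then d' else d'.insert r' s) d).contains r = true := by
        rw [PySem.Dict.contains_eq_isSome_get?, h1, ← PySem.Dict.contains_eq_isSome_get?]; exact hc
      simp [h2, h1, hc]
    · have hcf : d.contains r = false := by simpa using hc
      have h1 := pvInnerIdx gp s d r
      rw [hcf] at h1; simp only [and_true] at h1
      by_cases hm : r ∈ gp
      · rw [if_pos hm] at h1
        have h2 : (gp.foldl (fun d' r' => if d'.contains r' then d' else d'.insert r' s) d).contains r = true := by
          rw [PySem.Dict.contains_eq_isSome_get?, h1]; rfl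
        rw [if_pos h2, h1, if_neg hc]
        simp [pvGpiA, hm]
      · rw [if_neg hm] at h1
        have h2 : (gp.foldl (fun d' r' => if d'.contains r' then d' else d'.insert r' s) d).contains r = false := by
          rw [PySem.Dict.contains_eq_isSome_get?, h1, ← PySem.Dict.contains_eq_isSome_get?]; simpa using hc
        rw [if_neg (by simp [h2]), if_neg hc]
        simp [pvGpiA, hm]

lemma pvIdx_getD (gps : List (List Int)) (r : Int) :
    (pvIdxB gps).getD r 0 = pvG gps r := by
  rw [PySem.Dict.getD_eq_get?_getD, pvIdxB, pvOuterIdx]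
  have : (PySem.Dict.empty : PySem.Dict Int Int).contains r = false := by
    rw [PySem.Dict.contains_eq_isSome_get?, PySem.Dict.get?_empty]; rfl
  rw [this]; simp [pvG]

-- ---- side B: the items-sum over the running counter counts greater earlier elements ----

lemma pvSumIteFilter (p : Int → Bool) (c : Int → Nat) (D : List Int) :
    (D.map (fun k => if p k then (c k : Int) else 0)).sum
      = ((D.filter p).map (fun k => (c k : Int))).sum := by
  induction D with
  | nil => simp
  | cons x D ih =>
    by_cases hx : p x <;> simp [hx, ih]

lemma pvSumGT (S : List Int) (g : Int) :
    ((S.foldl (fun d x => d.insert x (d.getD x 0 + 1)) PySem.Dict.empty).items.foldl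
        (fun s p => if p.1 > g then s + p.2 else s) 0)
      = (S.countP (fun a => decide (g < a)) : Int) := by
  rw [PySem.Dict.foldl_insert_getD_add_one_eq_counter, PySem.Dict.items_counter, List.foldl_map]
  have hf : (fun (s : Int) (k : Int) => if (k, (S.count k : Int)).1 > g then s + (k, (S.count k : Int)).2 else s)
      = fun s k => s + (if decide (g < k) then (S.count k : Int) else 0) := by
    funext s k
    by_cases h : g < k <;> simp [h]
  rw [hf, PySem.List.foldl_add]
  have hperm : (PySem.Set.ofList S).Perm S.dedup :=
    (List.perm_ext_iff_of_nodup (PySem.Set.nodup_ofList S) (List.nodup_dedup S)).mpr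
      (fun x => by rw [PySem.Set.mem_ofList, List.mem_dedup])
  rw [List.Perm.sum_eq (hperm.map _), pvSumIteFilter, zero_add,
      ← List.sum_map_count_dedup_filter_eq_countP (fun a => decide (g < a)) S,
      Nat.cast_list_sum, List.map_map]
  rfl

-- ---- side B: the streaming fold computes pvInvs2 ----

lemma pvStreamB (M : List (List Int)) (c : Int) (S : List Int) :
    (M.foldl
      (fun (st : Int × PySem.Dict Int Int) gs =>
        (gs.foldl (fun c g => c + st.2.items.foldl (fun s p => if p.1 > g then s + p.2 else s) 0) st.1,
         gs.foldl (fun d g => d.insert g (d.getD g 0 + 1)) st.2))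
      (c, S.foldl (fun d x => d.insert x (d.getD x 0 + 1)) PySem.Dict.empty)).1
    = c + pvInvs2 S M := by
  induction M generalizing c S with
  | nil => simp [pvInvs2]
  | cons gs rest ih =>
    simp only [List.foldl_cons]
    have hfst : (gs.foldl (fun c g =>
        c + (S.foldl (fun d x => d.insert x (d.getD x 0 + 1)) PySem.Dict.empty).items.foldl
              (fun s p => if p.1 > g then s + p.2 else s) 0) c)
        = c + pvCrossB S gs := by
      have hf : (fun (c : Int) (g : Int) =>
          c + (S.foldl (fun d x => d.insert x (d.getD x 0 + 1)) PySem.Dict.empty).items.foldl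
                (fun s p => if p.1 > g then s + p.2 else s) 0)
          = fun c g => c + (S.countP (fun a => decide (g < a)) : Int) := by
        funext c g; rw [pvSumGT]
      rw [hf, PySem.List.foldl_add]; rfl
    have hsnd : (gs.foldl (fun d g => d.insert g (d.getD g 0 + 1))
          (S.foldl (fun d x => d.insert x (d.getD x 0 + 1)) (PySem.Dict.empty : PySem.Dict Int Int)))
        = (S ++ gs).foldl (fun d x => d.insert x (d.getD x 0 + 1)) (PySem.Dict.empty : PySem.Dict Int Int) := by
      rw [List.foldl_append]
    rw [hfst, hsnd, ih (c + pvCrossB S gs) (S ++ gs)]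
    show _ = c + (pvCrossB S gs + pvInvs2 (S ++ gs) rest)
    ring

-- ===== VERDICT (by name: the statement is the Claim_ definition above) =====
theorem get_root_swaps_spec : Claim_equal_get_root_swaps := by
  intro rps gps _ _
  show pvLoopA gps rps 0 = _
  rw [pvLoopA_eq]
  unfold get_root_swaps_alt
  have hmap : ∀ part : List Int, part.map (fun r => (pvIdxB gps).getD r 0) = part.map (pvG gps) :=
    fun part => List.map_congr_left fun r _ => pvIdx_getD gps r
  simp only [hmap]
  have := pvStreamB (rps.map (fun p => p.map (pvG gps))) 0 []
  rw [List.foldl_map] at this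
  simp only [List.foldl_nil] at this
  rw [this]
  have h0 : pvInvs2 [] (rps.map (fun p => p.map (pvG gps))) = pvInvs (rps.map (fun p => p.map (pvG gps))) := by
    rw [pvInvs2_eq]
    have : ((rps.map (fun p => p.map (pvG gps))).map (fun y => pvCrossB [] y)).sum = 0 := by
      rw [show (fun y => pvCrossB [] y) = (fun _ : List Int => (0 : Int)) from funext fun y => pvCrossB_nil y]
      simp [Function.comp_def]
    rw [this, zero_add]
  rw [h0]
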